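-- pv_equiv track=rewrite | github.com/nickirk/pymes | integral/contraction.py | gen_sym_str_inds
-- ===== SOURCE A (Python) =====
-- import itertools
--
-- def gen_sym_str_inds(string_inds):
--     '''
--     This function generates all 48 symmetry related indices.
--
--     Parameters:
--     -----------
--     string_inds: string, containing six characters
--
--     Returns:
--     --------
--     full_sym_inds: list of strings
--     '''
--     full_sym_inds = [string_inds]
--     # exchange of two indices
--     i = 0
--     while i < 3:
--         num_ele = len(full_sym_inds)
--         for ind in range(num_ele):
--             tmp_inds = list(full_sym_inds[ind])
--             tmp_inds[i], tmp_inds[i+3] = tmp_inds[i+3], tmp_inds[i]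
--             full_sym_inds.append(''.join(tmp_inds))
--         i += 1
--
--     # exchange of a pair of indices
--     tmp_inds = []
--     for i in full_sym_inds:
--         i = list(i)
--         for per_1, per_2 in zip(itertools.permutations(i[:3]), itertools.permutations(i[3:])):
--
--             per = ''.join(per_1+per_2)
--             tmp_inds.append(per)
--     full_sym_inds = tmp_inds
--     return full_sym_inds
-- ===== SOURCE B (Python) =====
-- import itertools
--
-- def gen_sym_str_inds(string_inds):
--     # phase 1: the 8 swap masks directly (bit i decides whether positions i and i+3 swap);
--     # mask order (b0 fastest) reproduces the binary-counting order of the doubling construction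
--     bases = []
--     for b2, b1, b0 in itertools.product((0, 1), repeat=3):
--         chars = list(string_inds)
--         for i, bit in enumerate((b0, b1, b2)):
--             if bit:
--                 chars[i], chars[i + 3] = chars[i + 3], chars[i]
--         bases.append(chars)
--     # phase 2: paired permutations of the two index triples
--     return [''.join(p1 + p2)
--             for chars in bases
--             for p1, p2 in zip(itertools.permutations(chars[:3]),
--                               itertools.permutations(chars[3:]))]
-- ===== Notes on version B (the rewrite author's own statement) =====
-- stated objective: simpler
-- what changed: The first phase's in-place list doubling (a while loop appending a swapped copy of every element already in the list) is replaced by a direct enumeration of the 8 swap masks via itertools.product, building each base string from scratch; the second phase becomes a single flat comprehension.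
import Mathlib
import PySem

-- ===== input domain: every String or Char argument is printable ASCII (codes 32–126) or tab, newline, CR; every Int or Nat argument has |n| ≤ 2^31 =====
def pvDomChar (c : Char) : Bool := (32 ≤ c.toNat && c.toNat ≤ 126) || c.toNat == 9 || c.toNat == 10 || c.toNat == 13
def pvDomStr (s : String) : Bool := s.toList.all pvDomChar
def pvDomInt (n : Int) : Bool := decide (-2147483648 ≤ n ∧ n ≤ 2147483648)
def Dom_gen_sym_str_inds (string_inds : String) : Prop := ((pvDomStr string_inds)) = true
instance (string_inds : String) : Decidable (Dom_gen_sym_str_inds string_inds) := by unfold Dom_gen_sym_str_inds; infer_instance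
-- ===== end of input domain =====

-- B replaces A's list-doubling first phase by a direct enumeration of the 8 swap masks (simpler decomposition).

-- shared helper: the simultaneous swap 'tmp[i], tmp[i+3] = tmp[i+3], tmp[i]' (both Pythons contain this line);
-- exact on in-range indices (Pre_ guarantees length ≥ 6, so i, i+3 < length for i < 3)
def pvSwap (l : List Char) (i : Nat) : List Char :=
  (l.set i (l.getD (i + 3) ' ')).set (i + 3) (l.getD i ' ')

-- shared helper: the first k permutations of l in itertools.permutations' exact order (pick each index
-- left to right, recurse on the rest); the budget k ports the LAZINESS of the generator — Python's zip
-- consumes at most 6 permutations of each side, so only a prefix is ever materialised.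
-- fuel = length makes it structurally total; exact for every list and budget.
def pyPermsTakeF : Nat → List Char → Nat → List (List Char)
  | _, _, 0 => []
  | _, [], _ => [[]]
  | 0, _, _ => [[]]
  | n + 1, l, k =>
      (List.range l.length).foldl
        (fun acc i =>
          if acc.length < k then
            acc ++ (pyPermsTakeF n (l.eraseIdx i) (k - acc.length)).map (fun p => l.getD i ' ' :: p)
          else acc)
        []

def pyPermsTake (l : List Char) (k : Nat) : List (List Char) := pyPermsTakeF l.length l k

-- ===== PORT A =====
def gen_sym_str_inds (string_inds : String) : List String :=
  -- phase 1: while i < 3: double the list, appending each element with positions i, i+3 swapped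
  let full :=
    (List.range 3).foldl
      (fun full i => full ++ full.map (fun str => String.ofList (pvSwap str.toList i)))
      [string_inds]
  -- phase 2: for each string, zip of permutations of the first three and of the rest, joined
  full.foldl
    (fun acc str =>
      let l := str.toList
      acc ++ ((pyPermsTake (l.take 3) 6).zip (pyPermsTake (l.drop 3) 6)).map
        (fun pq => String.ofList (pq.1 ++ pq.2)))
    []

-- ===== PORT B =====
-- apply the conditional swaps of one mask, positions 0,1,2 in order
def pvApplyMask (l : List Char) (bits : List (Nat × Nat)) : List Char :=
  bits.foldl (fun chars ib => if ib.2 = 1 then pvSwap chars ib.1 else chars) l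

def gen_sym_str_inds_alt (string_inds : String) : List String :=
  -- itertools.product((0,1), repeat=3): last component varies fastest
  let bits := [0, 1]
  let masks := bits.flatMap (fun b2 => bits.flatMap (fun b1 => bits.map (fun b0 => (b2, b1, b0))))
  let bases := masks.map (fun m =>
    pvApplyMask string_inds.toList [(0, m.2.2), (1, m.2.1), (2, m.1)])
  bases.flatMap (fun chars =>
    ((pyPermsTake (chars.take 3) 6).zip (pyPermsTake (chars.drop 3) 6)).map
      (fun pq => String.ofList (pq.1 ++ pq.2)))

-- ===== PRECONDITION & SPEC =====
-- Python A raises IndexError on strings shorter than 6 characters (so does B); those inputs are excluded.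
def Pre_gen_sym_str_inds (string_inds : String) : Prop := 6 ≤ string_inds.length
instance (string_inds : String) : Decidable (Pre_gen_sym_str_inds string_inds) := by
  unfold Pre_gen_sym_str_inds; infer_instance

def pvWitness_gen_sym_str_inds : String := "abcdef"

def Spec_gen_sym_str_inds (string_inds : String) (out : List String) : Prop := out = gen_sym_str_inds_alt string_inds
instance (string_inds : String) (out : List String) : Decidable (Spec_gen_sym_str_inds string_inds out) := by unfold Spec_gen_sym_str_inds; infer_instance

-- ===== CLAIM (what is proved, stated in full; the proofs are below) =====
def Claim_equal_gen_sym_str_inds : Prop := ∀ (string_inds : String), Dom_gen_sym_str_inds string_inds → Pre_gen_sym_str_inds string_inds → Spec_gen_sym_str_inds string_inds (gen_sym_str_inds string_inds)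

-- ===== LEMMAS AND PROOFS =====

-- ===== VERDICT (by name: the statement is the Claim_ definition above) =====
theorem gen_sym_str_inds_spec : Claim_equal_gen_sym_str_inds := by
  intro s _ _
  unfold Spec_gen_sym_str_inds gen_sym_str_inds gen_sym_str_inds_alt pvApplyMask
  simp [List.range, List.range.loop, List.foldl, List.map, List.flatMap, List.append_assoc]
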